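-- pv_equiv track=rewrite | github.com/kristinkor/python_interview_practice | getPass.py | getPasswordStrength
-- ===== SOURCE A (Python) =====
-- def getPasswordStrength(passwords, common_words):
--     def is_numbers(password):
--         return all(char in '0123456789' for char in password)
--
--     def is_uppercase(password):
--         return all(char.isupper() for char in password)
--
--     def is_lowercase(password):
--         return all(char.islower() for char in password)
--
--     def is_weak_password(password):
--         for word in common_words:
--             if word in password or word in password.split():
--                 return True
--         for word in common_words:
--             if word in password:
--                 return True
--         if is_numbers(password):
--             return True
--         if is_uppercase(password) or is_lowercase(password):
--             return True
--         if len(password) < 6: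
--             return True
--         return False
--
--     results = []
--     for password in passwords:
--         if is_weak_password(password):
--             results.append('weak')
--         else:
--             results.append('strong')
--     return results
-- ===== SOURCE B (Python) =====
-- def getPasswordStrength(passwords, common_words):
--     # index the common words once: a hash set of words plus the set of their lengths,
--     # then scan each password's windows of those lengths instead of looping per word
--     word_set = set(common_words)
--     lengths = {len(w) for w in common_words}
--
--     def contains_common(p):
--         n = len(p)
--         for L in lengths:
--             for i in range(n - L + 1):
--                 if p[i:i + L] in word_set:
--                     return True
--         return False
--
--     def is_weak(p):
--         if len(p) < 6:
--             return True
--         only_digits = only_upper = only_lower = True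
--         for c in p:
--             only_digits = only_digits and c in '0123456789'
--             only_upper = only_upper and c.isupper()
--             only_lower = only_lower and c.islower()
--         if only_digits or only_upper or only_lower:
--             return True
--         return contains_common(p)
--
--     return ['weak' if is_weak(p) else 'strong' for p in passwords]
-- ===== Notes on version B (the rewrite author's own statement) =====
-- stated objective: faster
-- what changed: B builds a hash set of the common words and the set of their distinct lengths once, then scans each password's windows of those lengths for set membership, replacing A's two per-word substring loops and the split() list A allocates afresh for every word; the three character-class scans are fused into one pass and the cheap length check runs first.
import Mathlib
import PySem

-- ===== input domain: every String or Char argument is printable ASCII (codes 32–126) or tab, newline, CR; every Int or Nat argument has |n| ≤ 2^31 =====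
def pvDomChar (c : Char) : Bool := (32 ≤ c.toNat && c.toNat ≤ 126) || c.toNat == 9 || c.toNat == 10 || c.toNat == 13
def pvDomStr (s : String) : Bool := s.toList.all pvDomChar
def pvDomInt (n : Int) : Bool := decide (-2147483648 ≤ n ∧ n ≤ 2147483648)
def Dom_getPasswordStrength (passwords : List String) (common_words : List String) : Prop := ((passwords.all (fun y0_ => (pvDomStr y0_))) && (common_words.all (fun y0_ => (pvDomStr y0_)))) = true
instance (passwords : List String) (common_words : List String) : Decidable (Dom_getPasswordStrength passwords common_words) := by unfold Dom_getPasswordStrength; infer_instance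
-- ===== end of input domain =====

-- B indexes the common words once (a hash set of words plus the set of their distinct lengths)
-- and scans each password's windows of those lengths, instead of A's per-word substring loops
-- (run twice, with a split() allocated per word); measured faster in a timing run.

-- ===== PORT A =====
-- 'char in "0123456789"' on the single characters of a string is membership among its characters (exact)
def pvIsNumbersA (p : List Char) : Bool := p.all (fun c => "0123456789".toList.contains c)
def pvIsUpperA (p : List Char) : Bool := p.all PySem.Chars.isupper
def pvIsLowerA (p : List Char) : Bool := p.all PySem.Chars.islower

-- is_weak_password: the two word loops with early return, then the character/length checks
def pvIsWeakA (common_words : List String) (password : String) : Bool :=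
  if common_words.any (fun w => PySem.Str.isIn w password || (PySem.Str.split₀ password).contains w) then true
  else if common_words.any (fun w => PySem.Str.isIn w password) then true
  else if pvIsNumbersA password.toList then true
  else if pvIsUpperA password.toList || pvIsLowerA password.toList then true
  else if PySem.Str.len password < 6 then true
  else false

def getPasswordStrength (passwords : List String) (common_words : List String) : List String :=
  passwords.foldl (fun results p => results ++ [if pvIsWeakA common_words p then "weak" else "strong"]) []

-- ===== PORT B =====
-- contains_common: for L in lengths: for i in range(n - L + 1): if p[i:i+L] in word_set
def pvContainsCommonB (word_set : PySem.Set String) (lengths : PySem.Set Int) (p : String) : Bool :=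
  lengths.any (fun L =>
    (PySem.List.pyRange 0 (PySem.Str.len p - L + 1)).any (fun i =>
      PySem.Set.contains word_set (PySem.Str.slice p (some i) (some (i + L)))))

-- the fused single pass computing (only_digits, only_upper, only_lower)
def pvCharFlagsB (p : List Char) : Bool × Bool × Bool :=
  p.foldl (fun st c =>
      (st.1 && "0123456789".toList.contains c,
       st.2.1 && PySem.Chars.isupper c,
       st.2.2 && PySem.Chars.islower c))
    (true, true, true)

def pvIsWeakB (word_set : PySem.Set String) (lengths : PySem.Set Int) (p : String) : Bool :=
  if PySem.Str.len p < 6 then true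
  else
    let f := pvCharFlagsB p.toList
    if f.1 || f.2.1 || f.2.2 then true
    else pvContainsCommonB word_set lengths p

def getPasswordStrength_alt (passwords : List String) (common_words : List String) : List String :=
  let word_set := PySem.Set.ofList common_words
  let lengths := PySem.Set.ofList (common_words.map (fun w => PySem.Str.len w))
  passwords.map (fun p => if pvIsWeakB word_set lengths p then "weak" else "strong")

-- ===== PRECONDITION & SPEC =====
def Spec_getPasswordStrength (passwords : List String) (common_words : List String) (out : List String) : Prop := out = getPasswordStrength_alt passwords common_words
instance (passwords : List String) (common_words : List String) (out : List String) : Decidable (Spec_getPasswordStrength passwords common_words out) := by unfold Spec_getPasswordStrength; infer_instance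

-- ===== CLAIM (what is proved, stated in full; the proofs are below) =====
def Claim_equal_getPasswordStrength : Prop := ∀ (passwords : List String) (common_words : List String), Dom_getPasswordStrength passwords common_words → Spec_getPasswordStrength passwords common_words (getPasswordStrength passwords common_words)

-- ===== LEMMAS AND PROOFS =====

-- every piece produced by str.split() is an infix of the string (invariant of the split loop)
theorem pv_split₀_go_infix (s : List Char) : ∀ (cur : List Char) (acc : List (List Char))
    (w : List Char), w ∈ PySem.Chars.split₀.go s cur acc →
    w ∈ acc ∨ (∃ t, t <+: s ∧ w = cur.reverse ++ t) ∨ w <:+: s := by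
  induction s with
  | nil =>
    intro cur acc w h
    simp only [PySem.Chars.split₀.go] at h
    split at h
    · exact Or.inl (by simpa using h)
    · rcases (by simpa using h : w ∈ acc ∨ w = cur.reverse) with h | h
      · exact Or.inl h
      · exact Or.inr (Or.inl ⟨[], List.nil_prefix, by simp [h]⟩)
  | cons c rest ih =>
    intro cur acc w h
    simp only [PySem.Chars.split₀.go] at h
    split at h
    · split at h
      · rcases ih [] acc w h with h | h | h
        · exact Or.inl h
        · obtain ⟨t, ht, rfl⟩ := h
          exact Or.inr (Or.inr (by simpa using ht.isInfix.trans (List.suffix_cons c rest).isInfix))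
        · exact Or.inr (Or.inr (h.trans (List.suffix_cons c rest).isInfix))
      · rcases ih [] (cur.reverse :: acc) w h with h | h | h
        · rcases List.mem_cons.mp h with h | h
          · exact Or.inr (Or.inl ⟨[], List.nil_prefix, by simp [h]⟩)
          · exact Or.inl h
        · obtain ⟨t, ht, rfl⟩ := h
          exact Or.inr (Or.inr (by simpa using ht.isInfix.trans (List.suffix_cons c rest).isInfix))
        · exact Or.inr (Or.inr (h.trans (List.suffix_cons c rest).isInfix))
    · rcases ih (c :: cur) acc w h with h | h | h
      · exact Or.inl h
      · obtain ⟨t, ht, rfl⟩ := h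
        exact Or.inr (Or.inl ⟨c :: t, by simpa using ht, by simp⟩)
      · exact Or.inr (Or.inr (h.trans (List.suffix_cons c rest).isInfix))

-- hence 'w in p.split()' implies 'w in p' (A's split test is redundant)
theorem pv_mem_split₀_isIn (p w : String) (h : w ∈ PySem.Str.split₀ p) :
    PySem.Str.isIn w p = true := by
  rw [PySem.Str.isIn_iff_infix]
  simp only [PySem.Str.split₀, List.mem_map] at h
  obtain ⟨l, hl, rfl⟩ := h
  rcases pv_split₀_go_infix p.toList [] [] l hl with h | h | h
  · simp at h
  · obtain ⟨t, ht, rfl⟩ := h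
    simpa using ht.isInfix
  · simpa using h

-- B's window scan over the word lengths finds a common word exactly when some word is a substring
theorem pv_containsCommon_eq (cw : List String) (p : String) :
    pvContainsCommonB (PySem.Set.ofList cw)
      (PySem.Set.ofList (cw.map (fun w => PySem.Str.len w))) p
      = cw.any (fun w => PySem.Str.isIn w p) := by
  unfold pvContainsCommonB
  rw [Bool.eq_iff_iff]
  simp only [List.any_eq_true]
  constructor
  · rintro ⟨L, hL, i, hi, hit⟩
    rw [PySem.List.mem_pyRange_one] at hi
    rw [PySem.Set.contains_iff, PySem.Set.mem_ofList] at hit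
    rw [PySem.Set.mem_ofList, List.mem_map] at hL
    obtain ⟨w0, _, rfl⟩ := hL
    refine ⟨_, hit, ?_⟩
    rw [PySem.Str.isIn_iff_infix]
    have h0 : (0:Int) ≤ PySem.Str.len w0 := by simp [PySem.Str.len_eq]
    have hsl : (PySem.Str.slice p (some i) (some (i + PySem.Str.len w0))).toList
        = (p.toList.drop i.toNat).take ((i + PySem.Str.len w0).toNat - i.toNat) := by
      simp only [PySem.Str.slice, PySem.Chars.slice, String.toList_ofList]
      exact PySem.List.slice_toNat _ hi.1 (by omega)
    rw [hsl]
    exact ((p.toList.drop i.toNat).take_prefix _).isInfix.trans (p.toList.drop_suffix i.toNat).isInfix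
  · rintro ⟨w, hw, hin⟩
    rw [PySem.Str.isIn_iff_infix] at hin
    obtain ⟨s, t, h⟩ := hin
    have hlen : p.toList.length = s.length + w.toList.length + t.length := by
      rw [← h]; simp; omega
    refine ⟨PySem.Str.len w, ?_, (s.length : Int), ?_, ?_⟩
    · rw [PySem.Set.mem_ofList, List.mem_map]; exact ⟨w, hw, rfl⟩
    · rw [PySem.List.mem_pyRange_one]
      constructor
      · positivity
      · simp only [PySem.Str.len_eq, hlen]; push_cast; omega
    · rw [PySem.Set.contains_iff, PySem.Set.mem_ofList]
      have hsl : (PySem.Str.slice p (some (s.length:Int)) (some ((s.length:Int) + PySem.Str.len w))).toList = w.toList := by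
        rw [PySem.Str.slice]
        simp only [PySem.Chars.slice]
        rw [PySem.List.slice_toNat _ (by positivity) (by simp [PySem.Str.len_eq]; positivity)]
        have h2 : ((s.length:Int) + PySem.Str.len w).toNat - (s.length:Int).toNat = w.toList.length := by
          simp [PySem.Str.len_eq]; omega
        rw [h2, Int.toNat_natCast, ← h, List.append_assoc, List.drop_left, List.take_left]
        simp
      have heq : PySem.Str.slice p (some (s.length:Int)) (some ((s.length:Int) + PySem.Str.len w)) = w := by
        have := congrArg String.ofList hsl
        simpa using this
      rw [heq]; exact hw

-- the fused flag pass computes A's three all-scans (generalised over the accumulator)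
theorem pv_charFlags_aux (p : List Char) : ∀ (a b c : Bool),
    p.foldl (fun st ch =>
      (st.1 && "0123456789".toList.contains ch,
       st.2.1 && PySem.Chars.isupper ch,
       st.2.2 && PySem.Chars.islower ch)) (a, b, c)
    = (a && p.all (fun ch => "0123456789".toList.contains ch),
       b && p.all PySem.Chars.isupper,
       c && p.all PySem.Chars.islower) := by
  induction p with
  | nil => intro a b c; simp
  | cons ch rest ih =>
    intro a b c
    simp only [List.foldl_cons, List.all_cons, ih, Bool.and_assoc]

theorem pv_charFlags_eq (p : List Char) :
    pvCharFlagsB p = (pvIsNumbersA p, pvIsUpperA p, pvIsLowerA p) := by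
  unfold pvCharFlagsB pvIsNumbersA pvIsUpperA pvIsLowerA
  rw [pv_charFlags_aux]
  simp

-- per-password equality of the two weakness tests
theorem pv_weak_eq (common_words : List String) (p : String) :
    pvIsWeakA common_words p
      = pvIsWeakB (PySem.Set.ofList common_words)
          (PySem.Set.ofList (common_words.map (fun w => PySem.Str.len w))) p := by
  have habs : ∀ w, (PySem.Str.isIn w p || (PySem.Str.split₀ p).contains w) = PySem.Str.isIn w p := by
    intro w
    cases hc : (PySem.Str.split₀ p).contains w
    · simp
    · rw [pv_mem_split₀_isIn p w (by simpa using hc)]; simp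
  unfold pvIsWeakA pvIsWeakB
  simp only [habs, pv_containsCommon_eq, pv_charFlags_eq]
  cases ha : common_words.any (fun w => PySem.Str.isIn w p) <;>
    cases hd : pvIsNumbersA p.toList <;>
    cases hu : pvIsUpperA p.toList <;>
    cases hl : pvIsLowerA p.toList <;>
    by_cases h6 : PySem.Str.len p < 6 <;>
    simp [h6]

-- ===== VERDICT (by name: the statement is the Claim_ definition above) =====
theorem getPasswordStrength_spec : Claim_equal_getPasswordStrength := by
  intro passwords common_words _
  show _ = _
  unfold getPasswordStrength getPasswordStrength_alt
  rw [PySem.List.foldl_append_singleton_eq_map]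
  simp only [List.nil_append]
  exact List.map_congr_left (fun p _ => by rw [pv_weak_eq])
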